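-- pv_equiv track=rewrite | github.com/Codaily/Algorithm_Programmers | Level3/최고의 집합/soohee.py | solution
-- ===== SOURCE A (Python) =====
-- def solution(n, s):
--     div = s // n
--
--     if div == 0: return [-1]
--
--     answer = [div]
--
--     while n > 1:
--         s -= s // n
--         n -= 1
--         answer.append(s // n)
--     return answer
-- ===== SOURCE B (Python) =====
-- def solution(n, s):
--     base = s // n
--     if base == 0:
--         return [-1]
--     if n <= 1:
--         return [base]
--     r = s % n
--     return [base] * (n - r) + [base + 1] * r
-- ===== Notes on version B (the rewrite author's own statement) =====
-- stated objective: simpler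
-- what changed: Replaces A's n-step repeated floor-division loop with a closed-form construction: base = s//n, r = s%n, output is (n-r) copies of base followed by r copies of base+1.
import Mathlib
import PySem

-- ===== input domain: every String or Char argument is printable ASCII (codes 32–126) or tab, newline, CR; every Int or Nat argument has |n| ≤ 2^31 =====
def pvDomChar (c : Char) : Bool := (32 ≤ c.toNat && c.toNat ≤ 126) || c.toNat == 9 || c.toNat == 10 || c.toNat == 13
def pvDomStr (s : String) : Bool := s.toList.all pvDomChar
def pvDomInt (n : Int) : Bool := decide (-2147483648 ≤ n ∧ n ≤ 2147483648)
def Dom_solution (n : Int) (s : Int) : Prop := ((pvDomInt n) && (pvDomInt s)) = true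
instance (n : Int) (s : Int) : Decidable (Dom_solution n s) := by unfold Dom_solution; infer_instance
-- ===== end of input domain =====

-- B replaces A's repeated floor-division loop with the closed form
-- [base]*(n-r) + [base+1]*r where base = s//n, r = s%n (objective: simpler).

-- ===== PORT A =====
-- the while loop: while n > 1: s -= s // n; n -= 1; answer.append(s // n)
def solLoop (n : Int) (s : Int) (acc : List Int) : List Int :=
  if _h : n > 1 then
    solLoop (n - 1) (s - PySem.Int.floordiv s n)
      (acc ++ [PySem.Int.floordiv (s - PySem.Int.floordiv s n) (n - 1)])
  else acc
termination_by n.toNat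
decreasing_by omega

def solution (n : Int) (s : Int) : List Int :=
  let div := PySem.Int.floordiv s n
  if div = 0 then [-1]
  else solLoop n s [div]

-- ===== PORT B =====
def solution_alt (n : Int) (s : Int) : List Int :=
  let base := PySem.Int.floordiv s n
  if base = 0 then [-1]
  else if n ≤ 1 then [base]
  else
    let r := PySem.Int.mod s n
    List.replicate (n - r).toNat base ++ List.replicate r.toNat (base + 1)

-- ===== PRECONDITION & SPEC =====
-- Pre_ excludes only n = 0, where Python A raises ZeroDivisionError (as does B).
def Pre_solution (n : Int) (s : Int) : Prop := n ≠ 0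
instance (n : Int) (s : Int) : Decidable (Pre_solution n s) := by unfold Pre_solution; infer_instance
def pvWitness_solution : Int × Int := (4, 14)

def Spec_solution (n : Int) (s : Int) (out : List Int) : Prop := out = solution_alt n s
instance (n : Int) (s : Int) (out : List Int) : Decidable (Spec_solution n s out) := by unfold Spec_solution; infer_instance

-- ===== CLAIM (what is proved, stated in full; the proofs are below) =====
def Claim_equal_solution : Prop := ∀ (n : Int) (s : Int), Dom_solution n s → Pre_solution n s → Spec_solution n s (solution n s)

-- ===== LEMMAS AND PROOFS =====

lemma fd_of_bounds (q r m : Int) (hm : 0 < m) (h0 : 0 ≤ r) (hr : r < m) :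
    PySem.Int.floordiv (q * m + r) m = q := by
  rw [PySem.Int.floordiv_eq_iff_of_pos hm]
  constructor
  · linarith
  · nlinarith

lemma solLoop_closed (k : Nat) : ∀ (q r : Int) (acc : List Int), 0 ≤ r → r ≤ (k : Int) →
    solLoop ((k : Int) + 1) (q * ((k : Int) + 1) + r) acc =
      acc ++ List.replicate (k - r.toNat) q ++ List.replicate r.toNat (q + 1) := by
  induction k with
  | zero =>
    intro q r acc h0 hk
    have hr0 : r = 0 := by omega
    rw [solLoop]
    simp [hr0]
  | succ k ih =>
    intro q r acc h0 hk
    rw [solLoop, dif_pos (by push_cast; omega)]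
    have hm : (((k + 1 : Nat) : Int) + 1) = (k : Int) + 2 := by push_cast; ring
    have hd1 : PySem.Int.floordiv (q * (((k + 1 : Nat) : Int) + 1) + r) (((k + 1 : Nat) : Int) + 1) = q := by
      rw [hm]; exact fd_of_bounds q r _ (by omega) h0 (by push_cast at hk ⊢; omega)
    rw [hd1]
    have hs' : q * (((k + 1 : Nat) : Int) + 1) + r - q = q * ((k : Int) + 1) + r := by push_cast; ring
    have hn' : (((k + 1 : Nat) : Int) + 1) - 1 = (k : Int) + 1 := by push_cast; ring
    rw [hs', hn']
    by_cases hcase : r ≤ (k : Int)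
    · have hd2 : PySem.Int.floordiv (q * ((k : Int) + 1) + r) ((k : Int) + 1) = q :=
        fd_of_bounds q r _ (by omega) h0 (by omega)
      rw [hd2, ih q r _ h0 hcase]
      have h1 : k + 1 - r.toNat = (k - r.toNat) + 1 := by omega
      simp [h1, List.replicate_succ]
    · have hrk : r = (k : Int) + 1 := by push_cast at hk; omega
      have hs2 : q * ((k : Int) + 1) + r = (q + 1) * ((k : Int) + 1) + 0 := by rw [hrk]; ring
      have hd2 : PySem.Int.floordiv (q * ((k : Int) + 1) + r) ((k : Int) + 1) = q + 1 := by
        rw [hs2]; exact fd_of_bounds (q + 1) 0 _ (by omega) le_rfl (by omega)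
      rw [hd2, hs2, ih (q + 1) 0 _ le_rfl (by omega)]
      have h1 : r.toNat = k + 1 := by omega
      simp [h1, List.replicate_succ]

-- main proof at the bottom (VERDICT)
-- ===== VERDICT (by name: the statement is the Claim_ definition above) =====
theorem solution_spec : Claim_equal_solution := by
  unfold Claim_equal_solution
  intro n s _hdom hpre
  unfold Spec_solution solution solution_alt
  set q := PySem.Int.floordiv s n with hq
  by_cases hq0 : q = 0
  · simp [hq0]
  · simp only [hq0, if_false]
    by_cases hn1 : n ≤ 1
    · rw [solLoop, dif_neg (by omega)]
      simp [hn1]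
    · simp only [hn1, if_false]
      set r := PySem.Int.mod s n with hr
      have hid : q * n + r = s := PySem.Int.floordiv_mul_add_mod s n
      have hrb : 0 ≤ r ∧ r < n := by
        rw [hr, PySem.Int.mod_eq_emod_of_pos (by omega)]
        exact ⟨Int.emod_nonneg s (by omega), Int.emod_lt_of_pos s (by omega)⟩
      have hk : n = ((n - 1).toNat : Int) + 1 := by omega
      have hs : q * (((n - 1).toNat : Int) + 1) + r = s := by rw [← hk]; exact hid
      have := solLoop_closed (n - 1).toNat q r [q] hrb.1 (by omega)
      rw [hk, ← hs, this]
      obtain ⟨hr0, hrn⟩ := hrb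
      have h2 : (((n.toNat - 1 : Nat) : Int) + 1 - r).toNat = (n.toNat - 1 - r.toNat) + 1 := by omega
      simp [h2, List.replicate_succ]
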